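-- pv_equiv track=rewrite | github.com/Male-D1ng/Ex.Python | PARCIALES_PRACTICE.PY | multiplos_de_primos
-- ===== SOURCE A (Python) =====
-- def buscar_divisores (nro:int)->list[int]:
--     res= []
--     divisor = nro
--     while nro >= divisor and divisor != 0:
--         if nro % divisor == 0:
--             res.append(divisor)
--         divisor -=1
--     return res
--
-- def divisores_primos (lista:list[int])-> list[int]:
--     res=[]
--     for n in lista:
--         if len(buscar_divisores(n)) == 2:
--             res.append(n)
--     return res
--
-- def multiplos_de_primos(v:list[int])->dict[int,int]:
--     res:dict[int,int]={}
--     for n in v: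
--         sus_divisores:list[int] = buscar_divisores(n)
--         divisores:list[int] = divisores_primos(sus_divisores)
--         for d in divisores:
--             if d in res.keys():
--                 res[d] +=1
--             else:
--                 res[d] = 1
--
--     return res
-- ===== SOURCE B (Python) =====
-- def _distinct_prime_factors(n):
--     # ascending list of the distinct prime factors of n (empty for n < 2),
--     # by trial division up to sqrt(n)
--     ps = []
--     m = n
--     p = 2
--     while p * p <= m:
--         if m % p == 0:
--             ps.append(p)
--             while m % p == 0:
--                 m //= p
--         p += 1
--     if m > 1:
--         ps.append(m)
--     return ps
--
-- def multiplos_de_primos(v):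
--     res = {}
--     for n in v:
--         for d in reversed(_distinct_prime_factors(n)):
--             res[d] = res.get(d, 0) + 1
--     return res
-- ===== Notes on version B (the rewrite author's own statement) =====
-- stated objective: faster
-- what changed: Per element, A enumerates all divisors of n by a full countdown scan and then prime-tests each divisor by recounting its divisors, while B extracts the distinct prime factors directly by trial division up to sqrt(n), emitting them in descending order; intended as faster (asymptotic), measured: a timing run's A timed out already at n=16 inputs (2^31-sized ints) where B returned instantly, so no ratio could be read at a size both finish.
import Mathlib
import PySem

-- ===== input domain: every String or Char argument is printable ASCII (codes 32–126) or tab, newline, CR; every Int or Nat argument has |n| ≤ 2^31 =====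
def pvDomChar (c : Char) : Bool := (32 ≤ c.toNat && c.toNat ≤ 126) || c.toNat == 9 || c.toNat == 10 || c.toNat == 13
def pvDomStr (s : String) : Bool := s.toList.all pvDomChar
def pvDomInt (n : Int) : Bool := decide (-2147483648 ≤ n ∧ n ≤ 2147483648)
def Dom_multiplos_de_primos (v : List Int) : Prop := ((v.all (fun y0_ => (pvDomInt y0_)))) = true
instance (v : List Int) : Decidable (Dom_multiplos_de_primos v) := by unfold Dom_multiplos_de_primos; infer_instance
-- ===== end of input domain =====

-- A's Python `while nro >= divisor and divisor != 0: …; divisor -= 1` loops forever for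
-- negative nro, so A never returns on a list with a negative element (excluded by Pre_ below).
-- B changes the algorithm: instead of listing all divisors of n (O(n)) and prime-testing each
-- one by recounting ITS divisors, B extracts the distinct prime factors by trial division up
-- to sqrt(n) and emits them in descending order (the order A inserts them into the dict).

-- ===== PORT A =====
-- `while nro >= divisor and divisor != 0` ported with fuel nro.toNat + 1, which is exactly
-- enough for every nro ≥ 0 (for nro < 0 the Python loop diverges; such inputs are outside Pre_).
def pvBuscarLoop (nro : Int) : Nat → Int → List Int → List Int
  | 0, _, res => res
  | f + 1, divisor, res =>
    if divisor ≤ nro ∧ divisor ≠ 0 then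
      pvBuscarLoop nro f (divisor - 1)
        (if PySem.Int.mod nro divisor = 0 then res ++ [divisor] else res)
    else res

def buscar_divisores (nro : Int) : List Int :=
  pvBuscarLoop nro (nro.toNat + 1) nro []

def divisores_primos (lista : List Int) : List Int :=
  lista.foldl (fun res n => if (buscar_divisores n).length = 2 then res ++ [n] else res) []

def multiplos_de_primos (v : List Int) : List (Int × Int) :=
  (v.foldl (fun res n =>
      (divisores_primos (buscar_divisores n)).foldl
        (fun res d =>
          if PySem.Dict.contains res d then PySem.Dict.modify res d 0 (· + 1)
          else PySem.Dict.insert res d 1) res)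
    (PySem.Dict.empty : PySem.Dict Int Int)).items

-- ===== PORT B =====
-- inner `while m % p == 0: m //= p`, fuel m.toNat (enough: each division at least halves m ≥ 1)
def pvStripLoop (p : Int) : Nat → Int → Int
  | 0, m => m
  | f + 1, m => if PySem.Int.mod m p = 0 then pvStripLoop p f (PySem.Int.floordiv m p) else m

-- outer `while p * p <= m`, fuel n.toNat + 2 (p only grows, m only shrinks)
def pvFactorLoop : Nat → Int → Int → List Int → List Int
  | 0, _, _, ps => ps
  | f + 1, p, m, ps =>
    if p * p ≤ m then
      if PySem.Int.mod m p = 0 then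
        pvFactorLoop f (p + 1) (pvStripLoop p m.toNat m) (ps ++ [p])
      else pvFactorLoop f (p + 1) m ps
    else if 1 < m then ps ++ [m] else ps

def distinct_prime_factors (n : Int) : List Int :=
  pvFactorLoop (n.toNat + 2) 2 n []

def multiplos_de_primos_alt (v : List Int) : List (Int × Int) :=
  (v.foldl (fun res n =>
      ((distinct_prime_factors n).reverse).foldl
        (fun res d => PySem.Dict.insert res d (PySem.Dict.getD res d 0 + 1)) res)
    (PySem.Dict.empty : PySem.Dict Int Int)).items

-- ===== PRECONDITION & SPEC =====
-- Pre_ excludes lists with a negative element: there A's countdown loop never terminates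
-- (divisor only decreases below nro), so A returns on exactly the inputs Pre_ admits.
def Pre_multiplos_de_primos (v : List Int) : Prop := ∀ x ∈ v, 0 ≤ x
instance (v : List Int) : Decidable (Pre_multiplos_de_primos v) := by
  unfold Pre_multiplos_de_primos; infer_instance

def pvWitness_multiplos_de_primos : List Int := [12, 7, 0, 1, 30]

def Spec_multiplos_de_primos (v : List Int) (out : List (Int × Int)) : Prop :=
  out = multiplos_de_primos_alt v
instance (v : List Int) (out : List (Int × Int)) : Decidable (Spec_multiplos_de_primos v out) := by
  unfold Spec_multiplos_de_primos; infer_instance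

-- ===== CLAIM (what is proved, stated in full; the proofs are below) =====
def Claim_equal_multiplos_de_primos : Prop :=
  ∀ (v : List Int), Dom_multiplos_de_primos v → Pre_multiplos_de_primos v →
    Spec_multiplos_de_primos v (multiplos_de_primos v)

-- ===== LEMMAS AND PROOFS =====

def canonAsc (k : Nat) : List Nat :=
  (List.range (k + 1)).filter (fun q => decide (Nat.Prime q ∧ q ∣ k))
def divListUpTo (k j : Nat) : List Nat :=
  (List.range (j + 1)).filter (fun d => decide (0 < d ∧ d ∣ k))

lemma pvBuscarLoop_spec (k : Nat) : ∀ (j : Nat), j ≤ k → ∀ (res : List Int),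
    pvBuscarLoop (k : Int) (j + 1) (j : Int) res
      = res ++ ((divListUpTo k j).map (fun d : Nat => (d : Int))).reverse := by
  intro j
  induction j with
  | zero =>
    intro _ res
    simp [pvBuscarLoop, divListUpTo, List.range_succ]
  | succ j ih =>
    intro hj res
    have hcond : ((j + 1 : Nat) : Int) ≤ (k : Int) ∧ ((j + 1 : Nat) : Int) ≠ 0 := by
      constructor
      · exact_mod_cast hj
      · positivity
    rw [pvBuscarLoop]
    simp only [Nat.cast_add, Nat.cast_one] at hcond ⊢
    rw [if_pos hcond]
    have hsub : (j : Int) + 1 - 1 = (j : Int) := by ring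
    rw [hsub]
    rw [ih (Nat.le_of_succ_le hj)]
    have hmod : (PySem.Int.mod (k : Int) ((j:Int) + 1) = 0) ↔ ((j+1 : Nat) ∣ k) := by
      rw [show ((j:Int)+1) = ((j+1 : Nat) : Int) by push_cast; ring]
      rw [PySem.Int.mod_eq_zero_iff_dvd]
      exact Int.natCast_dvd_natCast
    have hdl : divListUpTo k (j+1) = divListUpTo k j ++ if (j+1) ∣ k then [j+1] else [] := by
      unfold divListUpTo
      rw [List.range_succ, List.filter_append]
      congr 1
      by_cases hdvd : (j+1) ∣ k <;> simp [hdvd]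
    rw [hdl]
    by_cases hdvd : (j+1) ∣ k
    · rw [if_pos (hmod.mpr hdvd), if_pos hdvd]
      simp
    · rw [if_neg (fun hc => hdvd (hmod.mp hc)), if_neg hdvd]
      simp
lemma buscar_divisores_eq (k : Nat) :
    buscar_divisores (k : Int) = ((divListUpTo k k).map (fun d : Nat => (d : Int))).reverse := by
  unfold buscar_divisores
  rw [show ((k : Int).toNat) = k from Int.toNat_natCast k]
  simpa using pvBuscarLoop_spec k k le_rfl []

lemma divListUpTo_self_eq_filter (d : Nat) (hd : 0 < d) :
    divListUpTo d d = (List.range (d + 1)).filter (fun m => decide (m ∣ d)) := by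
  unfold divListUpTo
  apply List.filter_congr
  intro x hx
  simp only [decide_eq_decide]
  constructor
  · rintro ⟨-, h⟩; exact h
  · intro h; exact ⟨Nat.pos_of_dvd_of_pos h hd, h⟩

lemma length_buscar_two_iff (d : Nat) (hd : 0 < d) :
    (buscar_divisores (d : Int)).length = 2 ↔ Nat.Prime d := by
  have hlen : (((divListUpTo d d).map (fun m : Nat => (m : Int))).reverse).length
      = (divListUpTo d d).length := by simp
  rw [buscar_divisores_eq, hlen, divListUpTo_self_eq_filter d hd]
  have hcard : ((List.range (d + 1)).filter (fun m => decide (m ∣ d))).length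
      = (Nat.divisors d).card := by
    rw [← Nat.filter_dvd_eq_divisors hd.ne']
    rfl
  rw [hcard]
  constructor
  · intro h2
    by_contra hnp
    have hne1 : d ≠ 1 := by
      intro h1; subst h1; simp [Nat.divisors_one] at h2
    have h2le : 2 ≤ d := by omega
    obtain ⟨m, hm, hm1, hmd⟩ : ∃ m, m ∣ d ∧ m ≠ 1 ∧ m ≠ d := by
      rcases (Nat.exists_dvd_of_not_prime2 h2le hnp) with ⟨m, hmdvd, h2m, hmlt⟩
      exact ⟨m, hmdvd, by omega, by omega⟩
    have hsub : ({1, m, d} : Finset ℕ) ⊆ d.divisors := by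
      intro x hx
      simp only [Finset.mem_insert, Finset.mem_singleton] at hx
      rcases hx with rfl | rfl | rfl
      · exact Nat.one_mem_divisors.mpr hd.ne'
      · exact Nat.mem_divisors.mpr ⟨hm, hd.ne'⟩
      · exact Nat.mem_divisors.mpr ⟨dvd_refl _, hd.ne'⟩
    have hc3 : ({1, m, d} : Finset ℕ).card = 3 := by
      rw [Finset.card_insert_of_notMem (by simp [hm1.symm, hne1.symm]),
        Finset.card_insert_of_notMem (by simp [hmd]), Finset.card_singleton]
    have := Finset.card_le_card hsub
    omega
  · intro hp
    rw [hp.divisors, Finset.card_insert_of_notMem (by simp [hp.one_lt.ne]),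
      Finset.card_singleton]
lemma mem_canonAsc {k q : Nat} (hk : 0 < k) : q ∈ canonAsc k ↔ Nat.Prime q ∧ q ∣ k := by
  unfold canonAsc
  simp only [List.mem_filter, List.mem_range, decide_eq_true_eq]
  constructor
  · rintro ⟨-, h⟩; exact h
  · intro h
    exact ⟨Nat.lt_succ_of_le (Nat.le_of_dvd hk h.2), h⟩

lemma pairwise_canonAsc (k : Nat) : (canonAsc k).Pairwise (· < ·) :=
  List.Pairwise.sublist List.filter_sublist List.pairwise_lt_range

lemma eq_of_pairwise_lt_of_mem_iff {l1 l2 : List Nat}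
    (h1 : l1.Pairwise (· < ·)) (h2 : l2.Pairwise (· < ·))
    (h : ∀ x, x ∈ l1 ↔ x ∈ l2) : l1 = l2 := by
  have d1 : l1.Nodup := h1.imp (fun {a b} hab => Nat.ne_of_lt hab)
  have d2 : l2.Nodup := h2.imp (fun {a b} hab => Nat.ne_of_lt hab)
  have hp : l1.Perm l2 := by
    apply List.perm_of_nodup_nodup_toFinset_eq d1 d2
    ext x
    simp only [List.mem_toFinset, h x]
  exact List.Perm.eq_of_pairwise
    (fun a b _ _ hab hba => le_antisymm hab.le hba.le) h1 h2 hp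

lemma divisores_primos_eq (k : Nat) :
    divisores_primos (buscar_divisores (k : Int))
      = ((canonAsc k).map (fun d : Nat => (d : Int))).reverse := by
  rw [buscar_divisores_eq]
  unfold divisores_primos
  rw [PySem.List.foldl_append_ite_eq_filter]
  rw [List.filter_reverse, List.filter_map]
  have hfc : (divListUpTo k k).filter
      ((fun n => decide ((buscar_divisores n).length = 2)) ∘ (fun d : Nat => (d : Int)))
      = (divListUpTo k k).filter (fun d => decide (Nat.Prime d)) := by
    apply List.filter_congr
    intro x hx
    have hx0 : 0 < x := by
      unfold divListUpTo at hx
      simp only [List.mem_filter, decide_eq_true_eq] at hx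
      exact hx.2.1
    simp only [Function.comp_apply, decide_eq_decide]
    exact length_buscar_two_iff x hx0
  rw [hfc]
  have : (divListUpTo k k).filter (fun d => decide (Nat.Prime d)) = canonAsc k := by
    unfold divListUpTo canonAsc
    rw [List.filter_filter]
    apply List.filter_congr
    intro x hx
    rw [← Bool.decide_and, decide_eq_decide]
    have hxpos : Nat.Prime x → 0 < x := Nat.Prime.pos
    tauto
  rw [this]
  simp
lemma pvStripLoop_spec (p : Nat) (hp : 2 ≤ p) :
    ∀ (f m : Nat), 0 < m → m ≤ f → ∃ m' : Nat,
      pvStripLoop (p : Int) f (m : Int) = (m' : Int) ∧ 0 < m' ∧ m' ∣ m ∧ ¬ p ∣ m' ∧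
        (∀ q : Nat, Nat.Prime q → ¬ q ∣ p → (q ∣ m' ↔ q ∣ m)) := by
  intro f
  induction f with
  | zero => intro m hm hf; omega
  | succ f ih =>
    intro m hm hf
    rw [pvStripLoop]
    by_cases hdvd : p ∣ m
    · have hmod : PySem.Int.mod (m : Int) (p : Int) = 0 :=
        (PySem.Int.mod_eq_zero_iff_dvd _ _).mpr (Int.natCast_dvd_natCast.mpr hdvd)
      rw [if_pos hmod, PySem.Int.floordiv_natCast]
      have hmp_pos : 0 < m / p := Nat.div_pos (Nat.le_of_dvd hm hdvd) (by omega)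
      have hmp_lt : m / p < m := Nat.div_lt_self hm (by omega)
      obtain ⟨m', heq, hpos, hdvd', hnp, hiff⟩ := ih (m / p) hmp_pos (by omega)
      refine ⟨m', heq, hpos, hdvd'.trans (Nat.div_dvd_of_dvd hdvd), hnp, ?_⟩
      intro q hq hqp
      rw [hiff q hq hqp]
      constructor
      · intro h; exact h.trans (Nat.div_dvd_of_dvd hdvd)
      · intro h
        have : q ∣ p * (m / p) := by
          rwa [Nat.mul_div_cancel' hdvd]
        rcases (Nat.Prime.dvd_mul hq).mp this with h' | h'
        · exact absurd h' hqp
        · exact h'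
    · have hmod : ¬ PySem.Int.mod (m : Int) (p : Int) = 0 := by
        intro hc
        exact hdvd (Int.natCast_dvd_natCast.mp ((PySem.Int.mod_eq_zero_iff_dvd _ _).mp hc))
      rw [if_neg hmod]
      exact ⟨m, rfl, hm, dvd_refl m, hdvd, fun q _ _ => Iff.rfl⟩
lemma canonAsc_one : canonAsc 1 = [] := by decide

lemma canonAsc_prime {m : Nat} (hm : Nat.Prime m) : canonAsc m = [m] := by
  apply eq_of_pairwise_lt_of_mem_iff (pairwise_canonAsc m) (by simp)
  intro x
  rw [mem_canonAsc hm.pos, List.mem_singleton]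
  constructor
  · rintro ⟨hx, hdvd⟩
    rcases (Nat.Prime.eq_one_or_self_of_dvd hm x hdvd) with h1 | h1
    · exact absurd (h1 ▸ hx) Nat.not_prime_one
    · exact h1
  · rintro rfl; exact ⟨hm, dvd_refl _⟩

lemma canonAsc_step {p m m' : Nat} (hp : Nat.Prime p) (hm' : 0 < m')
    (hpdvd : p ∣ m) (hsub : m' ∣ m) (hnp : ¬ p ∣ m')
    (hiff : ∀ q : Nat, Nat.Prime q → ¬ q ∣ p → (q ∣ m' ↔ q ∣ m))
    (hinv : ∀ q, 2 ≤ q → q < p → ¬ q ∣ m) (hm : 0 < m) :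
    canonAsc m = p :: canonAsc m' := by
  have hmem' : ∀ x, x ∈ canonAsc m' ↔ Nat.Prime x ∧ x ∣ m' := fun x => mem_canonAsc hm'
  apply eq_of_pairwise_lt_of_mem_iff (pairwise_canonAsc m)
  · rw [List.pairwise_cons]
    refine ⟨?_, pairwise_canonAsc m'⟩
    intro x hx
    rw [hmem' x] at hx
    obtain ⟨hxp, hxdvd⟩ := hx
    have hxm : x ∣ m := hxdvd.trans hsub
    have hge : ¬ x < p := fun hlt => hinv x hxp.two_le hlt hxm
    have hne : x ≠ p := by
      rintro rfl; exact hnp hxdvd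
    omega
  · intro x
    rw [mem_canonAsc hm, List.mem_cons, hmem' x]
    constructor
    · rintro ⟨hxp, hxdvd⟩
      by_cases hxe : x = p
      · exact Or.inl hxe
      · refine Or.inr ⟨hxp, ?_⟩
        rw [hiff x hxp (fun hc => hxe ((Nat.prime_dvd_prime_iff_eq hxp hp).mp hc))]
        exact hxdvd
    · rintro (rfl | ⟨hxp, hxdvd⟩)
      · exact ⟨hp, hpdvd⟩
      · exact ⟨hxp, hxdvd.trans hsub⟩

lemma pvFactorLoop_spec : ∀ (f p m : Nat) (acc : List Int), 2 ≤ p → 0 < m →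
    (∀ q, 2 ≤ q → q < p → ¬ q ∣ m) → m + 3 ≤ f + p → 1 ≤ f →
    pvFactorLoop f (p : Int) (m : Int) acc
      = acc ++ (canonAsc m).map (fun d : Nat => (d : Int)) := by
  intro f
  induction f with
  | zero => intro p m acc _ _ _ _ h1; omega
  | succ f ih =>
    intro p m acc hp hm hinv hfuel _
    rw [pvFactorLoop]
    by_cases hsq : (p : Int) * (p : Int) ≤ (m : Int)
    · rw [if_pos hsq]
      have hsqn : p * p ≤ m := by exact_mod_cast hsq
      have hpm : p ≤ m := le_trans (Nat.le_mul_of_pos_left p (by omega)) hsqn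
      have hf3 : 3 ≤ f + 1 := by omega
      by_cases hdvd : p ∣ m
      · have hmod : PySem.Int.mod (m : Int) (p : Int) = 0 :=
          (PySem.Int.mod_eq_zero_iff_dvd _ _).mpr (Int.natCast_dvd_natCast.mpr hdvd)
        rw [if_pos hmod]
        -- p is prime: otherwise its least prime factor contradicts the invariant
        have hpprime : Nat.Prime p := by
          by_contra hnp
          have h2 : p.minFac ∣ m := (Nat.minFac_dvd p).trans hdvd
          have h3 : p.minFac < p := (Nat.minFac_le (by omega)).lt_of_ne
            (fun hc => hnp (hc ▸ Nat.minFac_prime (by omega)))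
          exact hinv p.minFac (Nat.minFac_prime (by omega)).two_le h3 h2
        rw [show ((m : Int).toNat) = m from Int.toNat_natCast m]
        obtain ⟨m', heq, hm'pos, hm'dvd, hm'np, hm'iff⟩ :=
          pvStripLoop_spec p hp m m hm le_rfl
        rw [heq]
        -- m' < m: m' divides m and m' ≠ m (p divides m but not m')
        have hm'lt : m' < m :=
          (Nat.le_of_dvd hm hm'dvd).lt_of_ne (fun hc => hm'np (hc ▸ hdvd))
        have hstep := canonAsc_step hpprime hm'pos hdvd hm'dvd hm'np hm'iff hinv hm
        have hcast : ((p : Int) + 1) = ((p + 1 : Nat) : Int) := by push_cast; ring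
        rw [hcast, ih (p+1) m' (acc ++ [(p : Int)]) (by omega) hm'pos ?_ (by omega) (by omega),
          hstep]
        · simp
        · intro q h2q hq hqm'
          rcases Nat.lt_succ_iff_lt_or_eq.mp hq with h | h
          · exact hinv q h2q h (hqm'.trans hm'dvd)
          · subst h; exact hm'np hqm' 
      · have hmod : ¬ PySem.Int.mod (m : Int) (p : Int) = 0 := by
          intro hc
          exact hdvd (Int.natCast_dvd_natCast.mp ((PySem.Int.mod_eq_zero_iff_dvd _ _).mp hc))
        rw [if_neg hmod]
        have : ((p : Int) + 1) = ((p + 1 : Nat) : Int) := by push_cast; ring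
        rw [this]
        apply ih (p+1) m acc (by omega) hm ?_ (by omega) (by omega)
        intro q h2q hq hqm
        rcases Nat.lt_succ_iff_lt_or_eq.mp hq with h | h
        · exact hinv q h2q h hqm
        · subst h; exact hdvd hqm
    · rw [if_neg hsq]
      by_cases h1m : (1 : Int) < (m : Int)
      · rw [if_pos h1m]
        have h1mn : 1 < m := by exact_mod_cast h1m
        have hmprime : Nat.Prime m := by
          by_contra hnp
          have hle : m.minFac * m.minFac ≤ m := by
            have := Nat.minFac_sq_le_self (by omega) hnp
            simpa [pow_two] using this
          have hmlt : m < p * p := by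
            have := not_le.mp hsq
            exact_mod_cast this
          have hlt : m.minFac < p := by nlinarith [hle, hmlt]
          exact hinv m.minFac (Nat.minFac_prime (by omega)).two_le hlt (Nat.minFac_dvd m)
        rw [canonAsc_prime hmprime]
        simp
      · rw [if_neg h1m]
        have : m = 1 := by omega
        subst this
        rw [canonAsc_one]
        simp
lemma distinct_prime_factors_eq (k : Nat) :
    distinct_prime_factors (k : Int) = (canonAsc k).map (fun d : Nat => (d : Int)) := by
  rcases Nat.eq_zero_or_pos k with rfl | hk
  · decide
  · unfold distinct_prime_factors
    rw [show ((k : Int).toNat) = k from Int.toNat_natCast k,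
      show (2 : Int) = ((2 : Nat) : Int) by norm_num]
    simpa using pvFactorLoop_spec (k+2) 2 k [] le_rfl hk (by omega) (by omega) (by omega)

lemma perN (n : Int) (hn : 0 ≤ n) :
    divisores_primos (buscar_divisores n) = (distinct_prime_factors n).reverse := by
  have hk : n = ((n.toNat : Nat) : Int) := (Int.toNat_of_nonneg hn).symm
  rw [hk, divisores_primos_eq, distinct_prime_factors_eq]

lemma stepEq (res : PySem.Dict Int Int) (d : Int) :
    (if PySem.Dict.contains res d then PySem.Dict.modify res d 0 (· + 1)
     else PySem.Dict.insert res d 1)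
      = PySem.Dict.insert res d (PySem.Dict.getD res d 0 + 1) := by
  by_cases h : PySem.Dict.contains res d
  · simp only [h, if_true]
    exact PySem.Dict.ext_iff.mpr rfl
  · simp only [h, Bool.false_eq_true, if_false]
    rw [PySem.Dict.getD_of_not_contains (h := by simpa using h)]
    norm_num

lemma fold_eq : ∀ (v : List Int) (d : PySem.Dict Int Int), (∀ x ∈ v, 0 ≤ x) →
    v.foldl (fun res n =>
      (divisores_primos (buscar_divisores n)).foldl
        (fun res d =>
          if PySem.Dict.contains res d then PySem.Dict.modify res d 0 (· + 1)
          else PySem.Dict.insert res d 1) res) d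
    = v.foldl (fun res n =>
      ((distinct_prime_factors n).reverse).foldl
        (fun res d => PySem.Dict.insert res d (PySem.Dict.getD res d 0 + 1)) res) d := by
  intro v d hpre
  apply PySem.List.foldl_congr_mem
  intro acc x hx
  rw [perN x (hpre x hx), funext fun res => funext fun k => stepEq res k]

-- ===== VERDICT (by name: the statement is the Claim_ definition above) =====
theorem multiplos_de_primos_spec : Claim_equal_multiplos_de_primos := by
  intro v _ hpre
  unfold Spec_multiplos_de_primos multiplos_de_primos multiplos_de_primos_alt
  rw [fold_eq v _ hpre]
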